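-- pv_equiv track=rewrite | github.com/T-garfield/studyInReu | III-year/#archived/python/tasks/Новички/Трезнюк/2семинар/Строки1.py | password_generator
-- ===== SOURCE A (Python) =====
-- def password_generator(nickname):
--     password = ""
--     first_part = ""
--     second_part = ""
--     for char in nickname:
--         if char != nickname[-1]:
--             first_part += char
--         else:
--             second_part += char
--     password = second_part + first_part
--     return password
-- ===== SOURCE B (Python) =====
-- def password_generator(nickname):
--     if not nickname:
--         return nickname
--     last = nickname[-1]
--     return last * nickname.count(last) + nickname.replace(last, '')
-- ===== Notes on version B (the rewrite author's own statement) =====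
-- stated objective: faster
-- what changed: Replaces the per-character classification loop that builds two strings by repeated concatenation with count/replace: the result is last*count(last) prepended to the string with last removed.
import Mathlib
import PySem

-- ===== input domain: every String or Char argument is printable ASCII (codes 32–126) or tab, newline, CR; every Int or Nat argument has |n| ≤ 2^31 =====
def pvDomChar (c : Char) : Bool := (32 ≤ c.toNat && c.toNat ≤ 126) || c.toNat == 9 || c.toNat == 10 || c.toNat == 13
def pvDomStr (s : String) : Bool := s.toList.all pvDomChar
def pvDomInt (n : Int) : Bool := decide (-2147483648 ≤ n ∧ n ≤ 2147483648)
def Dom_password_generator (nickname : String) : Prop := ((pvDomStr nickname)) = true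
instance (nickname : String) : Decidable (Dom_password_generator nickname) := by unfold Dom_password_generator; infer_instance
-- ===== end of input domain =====

-- B replaces A's per-character classification loop by count/replace: last*count(last) + nickname with last removed (idiomatic).

-- ===== PORT A =====
-- for char in nickname: if char != nickname[-1]: first += char else: second += char; return second + first
def password_generator (nickname : String) : String :=
  let st := nickname.toList.foldl
    (fun (st : List Char × List Char) c =>
      if some c ≠ PySem.List.pyGet? nickname.toList (-1) then (st.1 ++ [c], st.2)
      else (st.1, st.2 ++ [c]))
    ([], [])
  String.ofList (st.2 ++ st.1)

-- ===== PORT B =====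
-- if not nickname: return nickname; last = nickname[-1]; return last*count(last) + replace(last,'')
def password_generator_alt (nickname : String) : String :=
  match PySem.List.pyGet? nickname.toList (-1) with
  | none => nickname
  | some last =>
      String.ofList (List.replicate (PySem.Chars.count nickname.toList [last]) last
                     ++ PySem.Chars.replace nickname.toList [last] [])

-- ===== PRECONDITION & SPEC =====
def Spec_password_generator (nickname : String) (out : String) : Prop := out = password_generator_alt nickname
instance (nickname : String) (out : String) : Decidable (Spec_password_generator nickname out) := by unfold Spec_password_generator; infer_instance

-- ===== CLAIM (what is proved, stated in full; the proofs are below) =====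
def Claim_equal_password_generator : Prop := ∀ (nickname : String), Dom_password_generator nickname → Spec_password_generator nickname (password_generator nickname)

-- ===== LEMMAS AND PROOFS =====

-- A's loop splits the list into the chars ≠ last (first_part) and the chars = last (second_part), in order.
theorem pv_classify (p : Char → Prop) [DecidablePred p] (l : List Char) (a1 a2 : List Char) :
    l.foldl (fun (st : List Char × List Char) c =>
        if p c then (st.1 ++ [c], st.2) else (st.1, st.2 ++ [c])) (a1, a2)
      = (a1 ++ l.filter (fun c => decide (p c)), a2 ++ l.filter (fun c => !decide (p c))) := by
  induction l generalizing a1 a2 with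
  | nil => simp
  | cons c t ih =>
      by_cases h : p c <;> simp [h, ih]

-- s.count(last) with a one-char needle counts occurrences of the char.
theorem pv_count_go_singleton (a : Char) (l : List Char) (fuel acc : Nat) (h : l.length ≤ fuel) :
    PySem.Chars.count.go [a] fuel l acc = acc + l.count a := by
  induction l generalizing fuel acc with
  | nil => cases fuel <;> simp [PySem.Chars.count.go]
  | cons c t ih =>
      cases fuel with
      | zero => simp at h
      | succ n =>
          simp only [PySem.Chars.count.go, List.isPrefixOf, Bool.and_true,
            List.length_cons, List.length_nil, List.drop_succ_cons, List.drop_zero]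
          by_cases hc : a = c
          · subst hc
            simp only [BEq.rfl, if_true]
            rw [ih n (acc + 1) (by simp at h; omega)]
            simp
            omega
          · have hb : (a == c) = false := by simpa using hc
            simp only [hb, Bool.false_eq_true, if_false]
            rw [ih n acc (by simp at h; omega)]
            simp [Ne.symm hc]

-- s.replace(last, '') with a one-char needle removes exactly the occurrences of the char.
theorem pv_replace_go_singleton (a : Char) (l : List Char) (fuel : Nat) (acc : List Char)
    (h : l.length ≤ fuel) :
    PySem.Chars.replace.go [a] [] fuel l acc = acc.reverse ++ l.filter (fun c => c != a) := by
  induction l generalizing fuel acc with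
  | nil => cases fuel <;> simp [PySem.Chars.replace.go]
  | cons c t ih =>
      cases fuel with
      | zero => simp at h
      | succ n =>
          simp only [PySem.Chars.replace.go, List.isPrefixOf, Bool.and_true,
            List.length_cons, List.length_nil, List.drop_succ_cons, List.drop_zero]
          by_cases hc : a = c
          · subst hc
            simp only [BEq.rfl, if_true, List.reverse_nil, List.nil_append]
            rw [ih n acc (by simp at h; omega)]
            simp
          · have hb : (a == c) = false := by simpa using hc
            simp only [hb, Bool.false_eq_true, if_false]
            rw [ih n (c :: acc) (by simp at h; omega)]
            simp [Ne.symm hc]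

theorem pv_count_singleton (a : Char) (l : List Char) :
    PySem.Chars.count l [a] = l.count a := by
  simpa [PySem.Chars.count] using pv_count_go_singleton a l l.length 0 le_rfl

theorem pv_replace_singleton (a : Char) (l : List Char) :
    PySem.Chars.replace l [a] [] = l.filter (fun c => c != a) := by
  simpa [PySem.Chars.replace] using pv_replace_go_singleton a l l.length [] le_rfl

-- ===== VERDICT (by name: the statement is the Claim_ definition above) =====
theorem password_generator_spec : Claim_equal_password_generator := by
  intro nickname _
  unfold Spec_password_generator
  simp only [password_generator, password_generator_alt]
  cases hg : PySem.List.pyGet? nickname.toList (-1) with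
  | none =>
      have hnil : nickname.toList = [] := by
        rw [PySem.List.pyGet?_neg_one] at hg
        simpa using List.getLast?_eq_none_iff.mp hg
      have h2 : String.ofList nickname.toList = nickname := String.ofList_toList
      rw [hnil] at h2
      simp only [hnil, List.foldl_nil, List.append_nil]
      exact h2
  | some last =>
      rw [pv_classify (fun c => some c ≠ some last) nickname.toList [] []]
      dsimp only
      rw [pv_count_singleton, pv_replace_singleton]
      simp only [List.nil_append]
      rw [← List.filter_beq last]
      congr 1
      congr 1
      · exact List.filter_congr (fun c _ => by by_cases h : c = last <;> simp [h])
      · exact List.filter_congr (fun c _ => by by_cases h : c = last <;> simp [h])
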